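-- pv_equiv track=rewrite | github.com/bposzewiecka/tytus | scripts/python/UBCS.py | generate_unbiased_freqs_list
-- ===== SOURCE A (Python) =====
-- def generate_unbiased_freqs_list(bins_lengths , threshold):
--     if len(bins_lengths) == 0:
--         return [[]]
--     else:
--         results = []
--
--         for first_bin_content in range(bins_lengths[0] + 1):
--
--             if first_bin_content <= threshold:
--                 remining_intervals = generate_unbiased_freqs_list(bins_lengths[1:], threshold - first_bin_content)
--
--                 for interval in remining_intervals:
--                     results.append([first_bin_content] + interval)
--
--         return results
-- ===== SOURCE B (Python) =====
-- def generate_unbiased_freqs_list(bins_lengths, threshold):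
--     memo = {}
--
--     def go(bins, remaining):
--         if not bins:
--             return [[]]
--         key = (bins, remaining)
--         cached = memo.get(key)
--         if cached is not None:
--             return cached
--         results = []
--         for v in range(bins[0] + 1):
--             if v <= remaining:
--                 for rest in go(bins[1:], remaining - v):
--                     results.append([v] + rest)
--         memo[key] = results
--         return results
--
--     return go(tuple(bins_lengths), threshold)
-- ===== Notes on version B (the rewrite author's own statement) =====
-- stated objective: alternative
-- what changed: Top-down dynamic programming: identical subproblems (suffix of bins, remaining threshold) are computed once and cached in a dict instead of being re-enumerated on every path.
import Mathlib
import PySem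

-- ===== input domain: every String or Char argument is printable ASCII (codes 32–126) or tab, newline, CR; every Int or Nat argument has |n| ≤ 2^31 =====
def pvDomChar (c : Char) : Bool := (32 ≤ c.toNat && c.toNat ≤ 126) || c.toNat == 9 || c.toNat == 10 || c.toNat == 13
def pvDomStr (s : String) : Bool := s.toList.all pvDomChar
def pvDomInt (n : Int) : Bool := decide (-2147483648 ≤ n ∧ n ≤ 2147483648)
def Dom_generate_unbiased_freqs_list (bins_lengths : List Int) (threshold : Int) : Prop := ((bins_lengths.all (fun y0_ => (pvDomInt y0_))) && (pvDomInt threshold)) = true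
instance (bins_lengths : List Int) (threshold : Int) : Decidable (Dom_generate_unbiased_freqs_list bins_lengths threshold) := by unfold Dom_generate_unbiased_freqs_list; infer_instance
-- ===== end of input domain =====

-- B memoizes subproblems keyed by (suffix of bins, remaining threshold) in a dict, so shared
-- subproblems are computed once instead of being re-enumerated on every path (objective: alternative).


-- ===== PORT A =====
-- A's `for first_bin_content in range(...)` loop is the explicit recursion pvALoop over the
-- range list; `bins_lengths[0]` / `bins_lengths[1:]` on the nonempty list are b / rest.
mutual
def generate_unbiased_freqs_list (bins_lengths : List Int) (threshold : Int) : List (List Int) :=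
  match bins_lengths with
  | [] => [[]]
  | b :: rest => pvALoop b rest threshold (PySem.List.pyRange 0 (b + 1) 1) []
termination_by (bins_lengths.length, 0)

def pvALoop (b : Int) (rest : List Int) (threshold : Int) (vs : List Int)
    (results : List (List Int)) : List (List Int) :=
  match vs with
  | [] => results
  | v :: vs' =>
    if v ≤ threshold then
      pvALoop b rest threshold vs'
        (results ++ (generate_unbiased_freqs_list rest (threshold - v)).map (fun interval => v :: interval))
    else
      pvALoop b rest threshold vs' results
termination_by (rest.length, vs.length)
end

-- ===== PORT B =====
-- B-side: the recursion threads the memo dict through; pvBLoop is B's `for v in range(...)` loop.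
mutual
def pvBGo (bins : List Int) (remaining : Int)
    (memo : PySem.Dict (List Int × Int) (List (List Int))) :
    List (List Int) × PySem.Dict (List Int × Int) (List (List Int)) :=
  match bins with
  | [] => ([[]], memo)
  | b :: rest =>
    match memo.get? (b :: rest, remaining) with
    | some cached => (cached, memo)
    | none =>
      let p := pvBLoop b rest remaining (PySem.List.pyRange 0 (b + 1) 1) [] memo
      (p.1, p.2.insert (b :: rest, remaining) p.1)
termination_by (bins.length, 0)

def pvBLoop (b : Int) (rest : List Int) (remaining : Int) (vs : List Int)
    (results : List (List Int))
    (memo : PySem.Dict (List Int × Int) (List (List Int))) :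
    List (List Int) × PySem.Dict (List Int × Int) (List (List Int)) :=
  match vs with
  | [] => (results, memo)
  | v :: vs' =>
    if v ≤ remaining then
      let q := pvBGo rest (remaining - v) memo
      pvBLoop b rest remaining vs' (results ++ q.1.map (fun r => v :: r)) q.2
    else
      pvBLoop b rest remaining vs' results memo
termination_by (rest.length, vs.length)
end

def generate_unbiased_freqs_list_alt (bins_lengths : List Int) (threshold : Int) : List (List Int) :=
  (pvBGo bins_lengths threshold PySem.Dict.empty).1

-- ===== PRECONDITION & SPEC =====
def Spec_generate_unbiased_freqs_list (bins_lengths : List Int) (threshold : Int) (out : List (List Int)) : Prop := out = generate_unbiased_freqs_list_alt bins_lengths threshold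
instance (bins_lengths : List Int) (threshold : Int) (out : List (List Int)) : Decidable (Spec_generate_unbiased_freqs_list bins_lengths threshold out) := by unfold Spec_generate_unbiased_freqs_list; infer_instance

-- ===== CLAIM (what is proved, stated in full; the proofs are below) =====
def Claim_equal_generate_unbiased_freqs_list : Prop := ∀ (bins_lengths : List Int) (threshold : Int), Dom_generate_unbiased_freqs_list bins_lengths threshold → Spec_generate_unbiased_freqs_list bins_lengths threshold (generate_unbiased_freqs_list bins_lengths threshold)

-- ===== LEMMAS AND PROOFS =====

-- Memo invariant: every cached value is A's value on that key.
def pvInv (memo : PySem.Dict (List Int × Int) (List (List Int))) : Prop :=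
  ∀ bs t v, memo.get? (bs, t) = some v → v = generate_unbiased_freqs_list bs t

theorem pvInv_empty : pvInv PySem.Dict.empty := by
  intro bs t v h
  simp [PySem.Dict.get?_empty] at h

mutual
theorem pvBGo_correct (bins : List Int) (remaining : Int)
    (memo : PySem.Dict (List Int × Int) (List (List Int))) (hinv : pvInv memo) :
    (pvBGo bins remaining memo).1 = generate_unbiased_freqs_list bins remaining ∧
      pvInv (pvBGo bins remaining memo).2 := by
  match bins with
  | [] =>
    simp [pvBGo, generate_unbiased_freqs_list]; exact hinv
  | b :: rest =>
    rw [pvBGo]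
    cases hmem : memo.get? (b :: rest, remaining) with
    | some cached =>
      simp only
      exact ⟨hinv _ _ _ hmem, hinv⟩
    | none =>
      simp only
      have hloop := pvBLoop_correct b rest remaining (PySem.List.pyRange 0 (b + 1) 1) [] memo hinv
      refine ⟨?_, ?_⟩
      · rw [hloop.1]; simp only [generate_unbiased_freqs_list]
      · intro bs t v hget
        by_cases hk : (bs, t) = ((b :: rest, remaining) : List Int × Int)
        · injection hk with h1 h2
          subst h1; subst h2
          rw [PySem.Dict.get?_insert_self] at hget
          cases hget
          rw [hloop.1]; simp only [generate_unbiased_freqs_list]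
        · rw [PySem.Dict.get?_insert_of_ne _ _ hk] at hget
          exact hloop.2 _ _ _ hget
termination_by (bins.length, 0)

theorem pvBLoop_correct (b : Int) (rest : List Int) (remaining : Int) (vs : List Int)
    (results : List (List Int))
    (memo : PySem.Dict (List Int × Int) (List (List Int))) (hinv : pvInv memo) :
    (pvBLoop b rest remaining vs results memo).1 = pvALoop b rest remaining vs results ∧
      pvInv (pvBLoop b rest remaining vs results memo).2 := by
  match vs with
  | [] => simp [pvBLoop, pvALoop]; exact hinv
  | v :: vs' =>
    rw [pvBLoop, pvALoop]
    by_cases hv : v ≤ remaining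
    · simp only [if_pos hv]
      have hgo := pvBGo_correct rest (remaining - v) memo hinv
      have hrec := pvBLoop_correct b rest remaining vs'
        (results ++ (pvBGo rest (remaining - v) memo).1.map (fun r => v :: r))
        (pvBGo rest (remaining - v) memo).2 hgo.2
      rw [hgo.1] at hrec ⊢
      exact hrec
    · simp only [if_neg hv]
      exact pvBLoop_correct b rest remaining vs' results memo hinv
termination_by (rest.length, vs.length)
end

-- ===== VERDICT (by name: the statement is the Claim_ definition above) =====
theorem generate_unbiased_freqs_list_spec : Claim_equal_generate_unbiased_freqs_list := by
  intro bins t _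
  unfold Spec_generate_unbiased_freqs_list generate_unbiased_freqs_list_alt
  exact (pvBGo_correct bins t PySem.Dict.empty pvInv_empty).1.symm
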